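-- pv_equiv track=rewrite | github.com/Wang-Yann/LeetCodeMe | python/LCP/LCP 20_meChtZ.py | busRapidTransit
-- ===== SOURCE A (Python) =====
-- from typing import List
-- import functools, itertools
--
-- def busRapidTransit(target: int, inc: int, dec: int, jump: List[int], cost: List[int]) -> int:
--     @functools.lru_cache(None)
--     def dp(cur_target):
--         if cur_target == 1:
--             return inc
--         res = inc * cur_target
--         for i, v in enumerate(jump):
--             quotient, rest = divmod(cur_target, v)
--             #注意当target为2，步幅也为2时，quotient+1又回到了2，进入死循环
--             if rest > 0:
--                 res = min(res, (v - rest) * dec + cost[i] + dp(quotient + 1))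
--             if quotient > 0:
--                 res = min(res, rest * inc + cost[i] + dp(quotient))
--         return res
--
--     MOD = 10 ** 9 + 7
--     return dp(target) % MOD
-- ===== SOURCE B (Python) =====
-- def busRapidTransit(target, inc, dec, jump, cost):
--     # Enumerate all reachable sub-targets explicitly, then fill a best-cost
--     # table bottom-up in ascending order (each state only depends on smaller ones).
--     seen = set()
--
--     def explore(cur):
--         if cur in seen:
--             return
--         seen.add(cur)
--         if cur == 1:
--             return
--         for v in jump:
--             q, r = divmod(cur, v)
--             if r > 0:
--                 explore(q + 1)
--             if q > 0:
--                 explore(q)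
--
--     explore(target)
--     best = {}
--     for cur in sorted(seen):
--         if cur == 1:
--             best[cur] = inc
--         else:
--             res = inc * cur
--             for i, v in enumerate(jump):
--                 q, r = divmod(cur, v)
--                 if r > 0:
--                     res = min(res, (v - r) * dec + cost[i] + best[q + 1])
--                 if q > 0:
--                     res = min(res, r * inc + cost[i] + best[q])
--             best[cur] = res
--     return best[target] % (10 ** 9 + 7)
-- ===== Notes on version B (the rewrite author's own statement) =====
-- stated objective: alternative
-- what changed: Replaces A's top-down lru_cache-memoized recursion by an explicit enumeration of all reachable sub-target states followed by a bottom-up dynamic-programming table filled in ascending state order.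
-- outside the precondition, e.g. on busRapidTransit(-3, 5, 3, [2], [1]): A returns 999999992, B raises KeyError
import Mathlib
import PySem

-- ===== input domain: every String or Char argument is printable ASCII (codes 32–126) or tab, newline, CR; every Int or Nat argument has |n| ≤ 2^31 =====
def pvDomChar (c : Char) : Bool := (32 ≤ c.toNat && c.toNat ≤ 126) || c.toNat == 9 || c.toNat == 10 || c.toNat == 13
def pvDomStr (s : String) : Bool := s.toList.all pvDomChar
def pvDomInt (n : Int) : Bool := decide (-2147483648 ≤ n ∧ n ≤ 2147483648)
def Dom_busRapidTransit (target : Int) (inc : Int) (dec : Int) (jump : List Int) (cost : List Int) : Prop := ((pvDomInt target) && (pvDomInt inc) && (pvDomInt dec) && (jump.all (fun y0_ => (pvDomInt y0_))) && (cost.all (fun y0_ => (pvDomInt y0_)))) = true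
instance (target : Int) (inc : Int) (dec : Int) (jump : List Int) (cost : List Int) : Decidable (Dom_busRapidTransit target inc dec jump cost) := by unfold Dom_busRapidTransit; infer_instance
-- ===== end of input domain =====

-- B replaces A's top-down memoized recursion by an explicit reachable-state enumeration followed by a
-- bottom-up table fill in ascending state order (objective: alternative; same asymptotic cost).

-- ===== PORT A =====
-- A's dp with functools.lru_cache: the cache is threaded explicitly as a PySem.Dict (state, value);
-- fuel target.toNat+1 dominates the recursion depth (each recursive call is on a strictly smaller positive state).
def dpA (inc dec : Int) (jump cost : List Int) : Nat → Int → PySem.Dict Int Int → Int × PySem.Dict Int Int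
  | 0, _, m => (0, m)                                   -- fuel exhausted: unreachable under Pre_
  | f+1, cur, m =>
    match m.get? cur with
    | some v => (v, m)                                  -- lru_cache hit
    | none =>
      if cur = 1 then (inc, m.insert cur inc)
      else
        let st := (PySem.List.enumerate jump 0).foldl (fun (st : Int × PySem.Dict Int Int) p =>
          let q := PySem.Int.floordiv cur p.2
          let r := PySem.Int.mod cur p.2
          let st1 := if 0 < r then
              let pr := dpA inc dec jump cost f (q + 1) st.2
              (min st.1 ((p.2 - r) * dec + PySem.List.pyGetD cost p.1 0 + pr.1), pr.2)
            else st
          if 0 < q then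
            let pr := dpA inc dec jump cost f q st1.2
            (min st1.1 (r * inc + PySem.List.pyGetD cost p.1 0 + pr.1), pr.2)
          else st1) (inc * cur, m)
        (st.1, st.2.insert cur st.1)

def busRapidTransit (target : Int) (inc : Int) (dec : Int) (jump : List Int) (cost : List Int) : Int :=
  PySem.Int.mod (dpA inc dec jump cost (target.toNat + 1) target PySem.Dict.empty).1 (10 ^ 9 + 7)

-- ===== PORT B =====
-- Source B's explore(): depth-first collection of the reachable states into a Python set.
def exploreB (jump : List Int) : Nat → Int → PySem.Set Int → PySem.Set Int
  | 0, _, seen => seen                                  -- fuel exhausted: unreachable under Pre_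
  | f+1, cur, seen =>
    if PySem.Set.contains seen cur then seen
    else
      let seen1 := PySem.Set.add seen cur
      if cur = 1 then seen1
      else jump.foldl (fun sn v =>
          let q := PySem.Int.floordiv cur v
          let r := PySem.Int.mod cur v
          let sn1 := if 0 < r then exploreB jump f (q + 1) sn else sn
          if 0 < q then exploreB jump f q sn1 else sn1) seen1

-- the body of Source B's inner `for i, v in enumerate(jump)` loop; `rec` is the lookup of an
-- already-computed sub-result (Source B: `best[...]`, modelled with default 0 — present under Pre_)
def jbody (inc dec : Int) (cost : List Int) (cur : Int) (rec : Int → Int) (res : Int) (p : Int × Int) : Int :=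
  let q := PySem.Int.floordiv cur p.2
  let r := PySem.Int.mod cur p.2
  let res1 := if 0 < r then min res ((p.2 - r) * dec + PySem.List.pyGetD cost p.1 0 + rec (q + 1)) else res
  if 0 < q then min res1 (r * inc + PySem.List.pyGetD cost p.1 0 + rec q) else res1

-- Source B's `for cur in sorted(seen)` loop filling the dict `best` bottom-up
def bestTable (inc dec : Int) (jump cost : List Int) (ss : List Int) : PySem.Dict Int Int :=
  ss.foldl (fun best cur =>
    if cur = 1 then best.insert cur inc
    else best.insert cur
      ((PySem.List.enumerate jump 0).foldl (jbody inc dec cost cur (fun s => best.getD s 0)) (inc * cur)))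
    PySem.Dict.empty

def busRapidTransit_alt (target : Int) (inc : Int) (dec : Int) (jump : List Int) (cost : List Int) : Int :=
  let seen := exploreB jump (target.toNat + 1) target PySem.Set.empty
  let ss := PySem.List.sorted seen (fun x => x) false
  let best := bestTable inc dec jump cost ss
  PySem.Int.mod (best.getD target 0) (10 ^ 9 + 7)

-- ===== PRECONDITION & SPEC =====
-- Pre_ is the inputs on which A returns and B agrees: target ≥ 1 with either target = 1 (immediate base
-- case, jump never inspected) or every jump factor ≤ -1 or ≥ 2 and cost long enough for the factors ≥ 2
-- (a factor ≤ -1 makes both branch guards false, so it is never used); plus the degenerate targets ≤ 0 on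
-- which no branch guard can fire (both programs then return inc*target mod 10^9+7).  Outside it A raises
-- (ZeroDivisionError for 0 ∈ jump, RecursionError for 1 ∈ jump, IndexError for a too-short cost) or, on
-- the remaining targets ≤ 0, returns accidental values of the degenerate recursion (see claim cites).
def Pre_busRapidTransit (target : Int) (inc : Int) (dec : Int) (jump : List Int) (cost : List Int) : Prop :=
  (1 ≤ target ∧ (target = 1 ∨ ((∀ v ∈ jump, v ≤ -1 ∨ 2 ≤ v) ∧
    ∀ p ∈ PySem.List.enumerate jump 0, 2 ≤ p.2 → p.1 < (cost.length : Int)))) ∨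
  (target ≤ 0 ∧ (0:Int) ∉ jump ∧
    ∀ v ∈ jump, ¬ 0 < PySem.Int.mod target v ∧ ¬ 0 < PySem.Int.floordiv target v)
instance (target : Int) (inc : Int) (dec : Int) (jump : List Int) (cost : List Int) : Decidable (Pre_busRapidTransit target inc dec jump cost) := by unfold Pre_busRapidTransit; infer_instance
def pvWitness_busRapidTransit : Int × Int × Int × List Int × List Int := (10, 5, 3, [2, 3], [1, 4])

def Spec_busRapidTransit (target : Int) (inc : Int) (dec : Int) (jump : List Int) (cost : List Int) (out : Int) : Prop := out = busRapidTransit_alt target inc dec jump cost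
instance (target : Int) (inc : Int) (dec : Int) (jump : List Int) (cost : List Int) (out : Int) : Decidable (Spec_busRapidTransit target inc dec jump cost out) := by unfold Spec_busRapidTransit; infer_instance

-- ===== CLAIM (what is proved, stated in full; the proofs are below) =====
def Claim_equal_busRapidTransit : Prop := ∀ (target : Int) (inc : Int) (dec : Int) (jump : List Int) (cost : List Int), Dom_busRapidTransit target inc dec jump cost → Pre_busRapidTransit target inc dec jump cost → Spec_busRapidTransit target inc dec jump cost (busRapidTransit target inc dec jump cost)

-- ===== LEMMAS AND PROOFS =====

-- pure (memo-free) value function of the shared recurrence, used only in proofs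
def dpP (inc dec : Int) (jump cost : List Int) : Nat → Int → Int
  | 0, _ => 0
  | f+1, cur =>
    if cur = 1 then inc
    else (PySem.List.enumerate jump 0).foldl (jbody inc dec cost cur (dpP inc dec jump cost f)) (inc * cur)

def dpV (inc dec : Int) (jump cost : List Int) (cur : Int) : Int :=
  dpP inc dec jump cost cur.toNat cur

-- the one-jump successor relation of a state and its reflexive-transitive closure
def StepR (jump : List Int) (x y : Int) : Prop :=
  x ≠ 1 ∧ ∃ v ∈ jump,
    (0 < PySem.Int.mod x v ∧ y = PySem.Int.floordiv x v + 1) ∨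
    (0 < PySem.Int.floordiv x v ∧ y = PySem.Int.floordiv x v)

def ReachR (jump : List Int) (x y : Int) : Prop := Relation.ReflTransGen (StepR jump) x y

lemma succ_bound (cur v : Int) (h2 : 2 ≤ cur) (hv : 2 ≤ v) :
    (0 < PySem.Int.mod cur v → 1 ≤ PySem.Int.floordiv cur v + 1 ∧ PySem.Int.floordiv cur v + 1 < cur) ∧
    (0 < PySem.Int.floordiv cur v → 1 ≤ PySem.Int.floordiv cur v ∧ PySem.Int.floordiv cur v < cur) := by
  have h0 : (0:Int) < v := by omega
  have hm := PySem.Int.floordiv_mul_add_mod cur v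
  have hr0 := PySem.Int.mod_nonneg cur h0
  have hrlt := PySem.Int.mod_lt cur h0
  set q := PySem.Int.floordiv cur v with hqdef
  set r := PySem.Int.mod cur v with hrdef
  have hq0 : 0 ≤ q := by
    by_contra hneg
    have hle : (0:Int) ≤ (-1 - q) * v := mul_nonneg (by omega) (by omega)
    nlinarith
  have hqv : 2 * q ≤ q * v := by nlinarith [mul_nonneg hq0 (by omega : (0:Int) ≤ v - 2)]
  constructor
  · intro hr
    constructor
    · omega
    · nlinarith
  · intro hq
    constructor
    · omega
    · nlinarith

lemma negv_guards (cur v : Int) (h1 : 1 ≤ cur) (hv : v ≤ -1) :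
    ¬(0 < PySem.Int.mod cur v) ∧ ¬(0 < PySem.Int.floordiv cur v) := by
  have hb := PySem.Int.mod_neg_bounds (a := cur) (b := v) (by omega)
  have hm := PySem.Int.floordiv_mul_add_mod cur v
  constructor
  · omega
  · intro hq
    have hqv : PySem.Int.floordiv cur v * v ≤ -1 := by
      nlinarith [mul_nonneg (show (0:Int) ≤ PySem.Int.floordiv cur v - 1 by omega)
        (show (0:Int) ≤ -v - 1 by omega)]
    omega

lemma step_facts {jump : List Int} {x y : Int} (hj : ∀ v ∈ jump, v ≤ -1 ∨ 2 ≤ v) (hx : 1 ≤ x)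
    (h : StepR jump x y) : 1 ≤ y ∧ y < x := by
  obtain ⟨hne, v, hv, hcase⟩ := h
  have h2 : 2 ≤ x := by omega
  rcases hcase with ⟨hr, rfl⟩ | ⟨hq, rfl⟩
  · rcases hj v hv with hneg | hv2
    · exact absurd hr (negv_guards x v hx hneg).1
    · exact (succ_bound x v h2 hv2).1 hr
  · rcases hj v hv with hneg | hv2
    · exact absurd hq (negv_guards x v hx hneg).2
    · exact (succ_bound x v h2 hv2).2 hq

lemma reach_le {jump : List Int} {x y : Int} (hj : ∀ v ∈ jump, v ≤ -1 ∨ 2 ≤ v) (hx : 1 ≤ x)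
    (h : ReachR jump x y) : 1 ≤ y ∧ y ≤ x := by
  induction h with
  | refl => exact ⟨hx, le_refl x⟩
  | tail hr hs ih =>
      have := step_facts hj ih.1 hs
      omega

lemma reach_one {jump : List Int} {y : Int} : ReachR jump 1 y ↔ y = 1 := by
  constructor
  · intro h
    rcases Relation.ReflTransGen.cases_head_iff.mp h with h1 | ⟨c, hs, _⟩
    · omega
    · exact absurd rfl hs.1
  · rintro rfl
    exact Relation.ReflTransGen.refl

lemma jbody_congr (inc dec : Int) (cost : List Int) (cur : Int) (rec1 rec2 : Int → Int) (res : Int) (p : Int × Int)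
    (h1 : 0 < PySem.Int.mod cur p.2 → rec1 (PySem.Int.floordiv cur p.2 + 1) = rec2 (PySem.Int.floordiv cur p.2 + 1))
    (h2 : 0 < PySem.Int.floordiv cur p.2 → rec1 (PySem.Int.floordiv cur p.2) = rec2 (PySem.Int.floordiv cur p.2)) :
    jbody inc dec cost cur rec1 res p = jbody inc dec cost cur rec2 res p := by
  simp only [jbody]
  by_cases hr : 0 < PySem.Int.mod cur p.2 <;>
    by_cases hq : 0 < PySem.Int.floordiv cur p.2 <;>
      simp only [hr, hq, if_pos, if_neg, not_false_iff] <;>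
        simp_all

lemma mem_enumerate_snd {jump : List Int} {p : Int × Int} (h : p ∈ PySem.List.enumerate jump 0) : p.2 ∈ jump := by
  have := List.mem_map_of_mem (f := fun x : Int × Int => x.2) h
  rwa [PySem.List.map_snd_enumerate] at this

lemma dpP_fuel (inc dec : Int) (jump cost : List Int) (hj : ∀ v ∈ jump, v ≤ -1 ∨ 2 ≤ v) :
    ∀ (f g : Nat) (cur : Int), 1 ≤ cur → cur.toNat ≤ f → cur.toNat ≤ g →
      dpP inc dec jump cost f cur = dpP inc dec jump cost g cur := by
  intro f
  induction f with
  | zero => intro g cur h1 hf hg; omega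
  | succ f ih =>
      intro g cur h1 hf hg
      cases g with
      | zero => omega
      | succ g' =>
          simp only [dpP]
          by_cases hc : cur = 1
          · simp [hc]
          · rw [if_neg hc, if_neg hc]
            apply PySem.List.foldl_congr_mem
            intro acc p hp
            have h2 : 2 ≤ cur := by omega
            apply jbody_congr
            · intro hrr
              rcases hj p.2 (mem_enumerate_snd hp) with hneg | hv2
              · exact absurd hrr (negv_guards cur p.2 (by omega) hneg).1
              · obtain ⟨hs1, hs2⟩ := (succ_bound cur p.2 h2 hv2).1 hrr
                exact ih g' _ hs1 (by omega) (by omega)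
            · intro hqq
              rcases hj p.2 (mem_enumerate_snd hp) with hneg | hv2
              · exact absurd hqq (negv_guards cur p.2 (by omega) hneg).2
              · obtain ⟨hs1, hs2⟩ := (succ_bound cur p.2 h2 hv2).2 hqq
                exact ih g' _ hs1 (by omega) (by omega)

lemma dpP_eq_dpV (inc dec : Int) (jump cost : List Int) (hj : ∀ v ∈ jump, v ≤ -1 ∨ 2 ≤ v)
    (f : Nat) (cur : Int) (h1 : 1 ≤ cur) (hf : cur.toNat ≤ f) :
    dpP inc dec jump cost f cur = dpV inc dec jump cost cur := by
  exact dpP_fuel inc dec jump cost hj f cur.toNat cur h1 hf (le_refl _)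

lemma dpV_one (inc dec : Int) (jump cost : List Int) : dpV inc dec jump cost 1 = inc := by
  rfl

lemma dpV_eq (inc dec : Int) (jump cost : List Int) (hj : ∀ v ∈ jump, v ≤ -1 ∨ 2 ≤ v) (cur : Int) (h2 : 2 ≤ cur) :
    dpV inc dec jump cost cur =
      (PySem.List.enumerate jump 0).foldl (jbody inc dec cost cur (dpV inc dec jump cost)) (inc * cur) := by
  obtain ⟨c, hc⟩ : ∃ c, cur.toNat = c + 1 := ⟨cur.toNat - 1, by omega⟩
  rw [dpV, hc]
  simp only [dpP]
  rw [if_neg (by omega : ¬ cur = 1)]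
  apply PySem.List.foldl_congr_mem
  intro acc p hp
  apply jbody_congr
  · intro hrr
    rcases hj p.2 (mem_enumerate_snd hp) with hneg | hv2
    · exact absurd hrr (negv_guards cur p.2 (by omega) hneg).1
    · obtain ⟨hs1, hs2⟩ := (succ_bound cur p.2 h2 hv2).1 hrr
      exact dpP_eq_dpV inc dec jump cost hj c _ hs1 (by omega)
  · intro hqq
    rcases hj p.2 (mem_enumerate_snd hp) with hneg | hv2
    · exact absurd hqq (negv_guards cur p.2 (by omega) hneg).2
    · obtain ⟨hs1, hs2⟩ := (succ_bound cur p.2 h2 hv2).2 hqq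
      exact dpP_eq_dpV inc dec jump cost hj c _ hs1 (by omega)

-- ------- A side: the threaded cache is correct -------

def GoodC (inc dec : Int) (jump cost : List Int) (m : PySem.Dict Int Int) : Prop :=
  ∀ k v, m.get? k = some v → v = dpV inc dec jump cost k

lemma dpA_correct (inc dec : Int) (jump cost : List Int) (hj : ∀ v ∈ jump, v ≤ -1 ∨ 2 ≤ v) :
    ∀ (f : Nat) (cur : Int) (m : PySem.Dict Int Int), 1 ≤ cur → cur.toNat ≤ f → GoodC inc dec jump cost m →
      (dpA inc dec jump cost f cur m).1 = dpV inc dec jump cost cur ∧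
      GoodC inc dec jump cost (dpA inc dec jump cost f cur m).2 := by
  intro f
  induction f with
  | zero => intro cur m h1 hf hg; omega
  | succ f ih =>
      intro cur m h1 hf hg
      simp only [dpA]
      cases hget : PySem.Dict.get? m cur with
      | some v => exact ⟨hg cur v hget, hg⟩
      | none =>
          by_cases hc : cur = 1
          · subst hc
            rw [if_pos rfl]
            refine ⟨(dpV_one inc dec jump cost).symm, ?_⟩
            intro k w hk
            rw [PySem.Dict.get?_insert] at hk
            by_cases hk1 : k = 1
            · subst hk1
              rw [if_pos rfl] at hk
              injection hk with hk
              rw [← hk, dpV_one]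
            · rw [if_neg hk1] at hk
              exact hg k w hk
          · rw [if_neg hc]
            have h2 : 2 ≤ cur := by omega
            have key : ∀ (l : List (Int × Int)), (∀ p ∈ l, p.2 ∈ jump) →
                ∀ (res : Int) (m' : PySem.Dict Int Int), GoodC inc dec jump cost m' →
                (List.foldl (fun (st : Int × PySem.Dict Int Int) p =>
                  let q := PySem.Int.floordiv cur p.2
                  let r := PySem.Int.mod cur p.2
                  let st1 := if 0 < r then
                      let pr := dpA inc dec jump cost f (q + 1) st.2
                      (min st.1 ((p.2 - r) * dec + PySem.List.pyGetD cost p.1 0 + pr.1), pr.2)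
                    else st
                  if 0 < q then
                    let pr := dpA inc dec jump cost f q st1.2
                    (min st1.1 (r * inc + PySem.List.pyGetD cost p.1 0 + pr.1), pr.2)
                  else st1) (res, m') l).1 =
                  List.foldl (jbody inc dec cost cur (dpV inc dec jump cost)) res l ∧
                GoodC inc dec jump cost (List.foldl (fun (st : Int × PySem.Dict Int Int) p =>
                  let q := PySem.Int.floordiv cur p.2
                  let r := PySem.Int.mod cur p.2
                  let st1 := if 0 < r then
                      let pr := dpA inc dec jump cost f (q + 1) st.2
                      (min st.1 ((p.2 - r) * dec + PySem.List.pyGetD cost p.1 0 + pr.1), pr.2)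
                    else st
                  if 0 < q then
                    let pr := dpA inc dec jump cost f q st1.2
                    (min st1.1 (r * inc + PySem.List.pyGetD cost p.1 0 + pr.1), pr.2)
                  else st1) (res, m') l).2 := by
              intro l
              induction l with
              | nil => intro _ res m' hg'; exact ⟨rfl, hg'⟩
              | cons p l ihl =>
                  intro hmem res m' hg'
                  have hpj : p.2 ∈ jump := hmem p (List.mem_cons_self)
                  by_cases hrr : 0 < PySem.Int.mod cur p.2 <;>
                    by_cases hqq : 0 < PySem.Int.floordiv cur p.2
                  · have hv2 : 2 ≤ p.2 := by
                      rcases hj p.2 hpj with hneg | hv2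
                      · exact absurd hrr (negv_guards cur p.2 (by omega) hneg).1
                      · exact hv2
                    have hb := succ_bound cur p.2 h2 hv2
                    obtain ⟨hs1, hs2⟩ := hb.1 hrr
                    obtain ⟨ht1, ht2⟩ := hb.2 hqq
                    have hA1 := ih (PySem.Int.floordiv cur p.2 + 1) m' hs1 (by omega) hg'
                    have hA2 := ih (PySem.Int.floordiv cur p.2)
                      (dpA inc dec jump cost f (PySem.Int.floordiv cur p.2 + 1) m').2 ht1 (by omega) hA1.2
                    simp only [List.foldl_cons, jbody, if_pos hrr, if_pos hqq]
                    simp only [hA1.1, hA2.1]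
                    exact ihl (fun p hp => hmem p (List.mem_cons_of_mem _ hp)) _ _ hA2.2
                  · have hv2 : 2 ≤ p.2 := by
                      rcases hj p.2 hpj with hneg | hv2
                      · exact absurd hrr (negv_guards cur p.2 (by omega) hneg).1
                      · exact hv2
                    obtain ⟨hs1, hs2⟩ := (succ_bound cur p.2 h2 hv2).1 hrr
                    have hA1 := ih (PySem.Int.floordiv cur p.2 + 1) m' hs1 (by omega) hg'
                    simp only [List.foldl_cons, jbody, if_pos hrr, if_neg hqq]
                    simp only [hA1.1]
                    exact ihl (fun p hp => hmem p (List.mem_cons_of_mem _ hp)) _ _ hA1.2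
                  · have hv2 : 2 ≤ p.2 := by
                      rcases hj p.2 hpj with hneg | hv2
                      · exact absurd hqq (negv_guards cur p.2 (by omega) hneg).2
                      · exact hv2
                    obtain ⟨ht1, ht2⟩ := (succ_bound cur p.2 h2 hv2).2 hqq
                    have hA2 := ih (PySem.Int.floordiv cur p.2) m' ht1 (by omega) hg'
                    simp only [List.foldl_cons, jbody, if_neg hrr, if_pos hqq]
                    simp only [hA2.1]
                    exact ihl (fun p hp => hmem p (List.mem_cons_of_mem _ hp)) _ _ hA2.2
                  · simp only [List.foldl_cons, jbody, if_neg hrr, if_neg hqq]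
                    exact ihl (fun p hp => hmem p (List.mem_cons_of_mem _ hp)) _ _ hg'
            obtain ⟨e1, e2⟩ := key (PySem.List.enumerate jump 0)
              (fun p hp => mem_enumerate_snd hp) (inc * cur) m hg
            constructor
            · show (List.foldl _ (inc * cur, m) (PySem.List.enumerate jump 0)).1 = dpV inc dec jump cost cur
              rw [e1, dpV_eq inc dec jump cost hj cur h2]
            · intro k w hk
              rw [PySem.Dict.get?_insert] at hk
              by_cases hkc : k = cur
              · subst hkc
                rw [if_pos rfl] at hk
                injection hk with hk
                rw [← hk, e1, dpV_eq inc dec jump cost hj k h2]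
              · rw [if_neg hkc] at hk
                exact e2 k w hk

-- ------- B side: explore collects exactly the reachable states -------

lemma reach_unfold {jump : List Int} {cur y : Int} (hc : cur ≠ 1) :
    ReachR jump cur y ↔ y = cur ∨ ∃ v ∈ jump,
      ((0 < PySem.Int.mod cur v ∧ ReachR jump (PySem.Int.floordiv cur v + 1) y) ∨
       (0 < PySem.Int.floordiv cur v ∧ ReachR jump (PySem.Int.floordiv cur v) y)) := by
  constructor
  · intro h
    rcases Relation.ReflTransGen.cases_head_iff.mp h with heq | ⟨c, hs, hrest⟩
    · exact Or.inl heq.symm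
    · refine Or.inr ?_
      obtain ⟨_, v, hv, hcase⟩ := hs
      refine ⟨v, hv, ?_⟩
      rcases hcase with ⟨h1, rfl⟩ | ⟨h1, rfl⟩
      · exact Or.inl ⟨h1, hrest⟩
      · exact Or.inr ⟨h1, hrest⟩
  · rintro (rfl | ⟨v, hv, hcase⟩)
    · exact Relation.ReflTransGen.refl
    · rcases hcase with ⟨h1, hrest⟩ | ⟨h1, hrest⟩
      · exact Relation.ReflTransGen.head ⟨hc, v, hv, Or.inl ⟨h1, rfl⟩⟩ hrest
      · exact Relation.ReflTransGen.head ⟨hc, v, hv, Or.inr ⟨h1, rfl⟩⟩ hrest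

set_option maxHeartbeats 1600000 in
lemma explore_correct (jump : List Int) (hj : ∀ v ∈ jump, v ≤ -1 ∨ 2 ≤ v) :
    ∀ (f : Nat) (cur : Int) (sn : PySem.Set Int), 1 ≤ cur → cur.toNat ≤ f → sn.Nodup →
      (∀ x ∈ sn, x ≤ cur → ∀ y, ReachR jump x y → y ∈ sn) →
      (exploreB jump f cur sn).Nodup ∧
      (∀ y, y ∈ exploreB jump f cur sn ↔ y ∈ sn ∨ ReachR jump cur y) := by
  intro f
  induction f with
  | zero => intro cur sn h1 hf hnd hcl; omega
  | succ f ih =>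
      intro cur sn h1 hf hnd hcl
      simp only [exploreB]
      by_cases hin : PySem.Set.contains sn cur
      · rw [if_pos hin]
        have hcur : cur ∈ sn := (PySem.Set.contains_iff sn cur).mp hin
        refine ⟨hnd, fun y => ⟨fun hy => Or.inl hy, fun hy => ?_⟩⟩
        rcases hy with hy | hy
        · exact hy
        · exact hcl cur hcur (le_refl cur) y hy
      · rw [if_neg hin]
        have hcur : cur ∉ sn := fun hmem => hin ((PySem.Set.contains_iff sn cur).mpr hmem)
        have hadd : PySem.Set.add sn cur = sn ++ [cur] := PySem.Set.add_of_not_mem hcur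
        have hnd1 : (PySem.Set.add sn cur).Nodup := PySem.Set.nodup_add sn cur hnd
        have hmem1 : ∀ y, y ∈ PySem.Set.add sn cur ↔ y ∈ sn ∨ y = cur := by
          intro y; rw [hadd]; simp
        by_cases hc : cur = 1
        · subst hc
          rw [if_pos rfl]
          refine ⟨hnd1, fun y => ?_⟩
          rw [hmem1, reach_one]
        · rw [if_neg hc]
          have h2 : 2 ≤ cur := by omega
          have hcl1 : ∀ x ∈ PySem.Set.add sn cur, x < cur → ∀ y, ReachR jump x y → y ∈ PySem.Set.add sn cur := by
            intro x hx hxlt y hr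
            rcases (hmem1 x).mp hx with hx' | rfl
            · exact (hmem1 y).mpr (Or.inl (hcl x hx' (le_of_lt hxlt) y hr))
            · omega
          have key : ∀ (l : List Int), (∀ v ∈ l, v ∈ jump) →
              ∀ (s0 : PySem.Set Int), s0.Nodup →
              (∀ x ∈ s0, x < cur → ∀ y, ReachR jump x y → y ∈ s0) →
              (List.foldl (fun sn v =>
                let q := PySem.Int.floordiv cur v
                let r := PySem.Int.mod cur v
                let sn1 := if 0 < r then exploreB jump f (q + 1) sn else sn
                if 0 < q then exploreB jump f q sn1 else sn1) s0 l).Nodup ∧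
              (∀ y, y ∈ List.foldl (fun sn v =>
                let q := PySem.Int.floordiv cur v
                let r := PySem.Int.mod cur v
                let sn1 := if 0 < r then exploreB jump f (q + 1) sn else sn
                if 0 < q then exploreB jump f q sn1 else sn1) s0 l ↔ y ∈ s0 ∨ ∃ v ∈ l,
                ((0 < PySem.Int.mod cur v ∧ ReachR jump (PySem.Int.floordiv cur v + 1) y) ∨
                 (0 < PySem.Int.floordiv cur v ∧ ReachR jump (PySem.Int.floordiv cur v) y))) := by
            intro l
            induction l with
            | nil => intro _ s0 hnd0 hcl0; exact ⟨hnd0, fun y => by simp⟩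
            | cons v l ihl =>
                intro hmemj s0 hnd0 hcl0
                have hvj : v ∈ jump := hmemj v List.mem_cons_self
                by_cases hrr : 0 < PySem.Int.mod cur v <;> by_cases hqq : 0 < PySem.Int.floordiv cur v
                · have hv2 : 2 ≤ v := by
                    rcases hj v hvj with hneg | hv2
                    · exact absurd hrr (negv_guards cur v (by omega) hneg).1
                    · exact hv2
                  have hb := succ_bound cur v h2 hv2
                  obtain ⟨hs1, hs2⟩ := hb.1 hrr
                  obtain ⟨ht1, ht2⟩ := hb.2 hqq
                  have hE1 := ih (PySem.Int.floordiv cur v + 1) s0 hs1 (by omega) hnd0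
                    (fun x hx hxle y hr => hcl0 x hx (by omega) y hr)
                  have hcl1' : ∀ x ∈ exploreB jump f (PySem.Int.floordiv cur v + 1) s0, x < cur →
                      ∀ y, ReachR jump x y → y ∈ exploreB jump f (PySem.Int.floordiv cur v + 1) s0 := by
                    intro x hx hxlt y hr
                    rcases (hE1.2 x).mp hx with hx' | hx'
                    · exact (hE1.2 y).mpr (Or.inl (hcl0 x hx' hxlt y hr))
                    · exact (hE1.2 y).mpr (Or.inr (Relation.ReflTransGen.trans hx' hr))
                  have hE2 := ih (PySem.Int.floordiv cur v) _ ht1 (by omega) hE1.1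
                    (fun x hx hxle y hr => hcl1' x hx (by omega) y hr)
                  have hcl2' : ∀ x ∈ exploreB jump f (PySem.Int.floordiv cur v)
                      (exploreB jump f (PySem.Int.floordiv cur v + 1) s0), x < cur →
                      ∀ y, ReachR jump x y → y ∈ exploreB jump f (PySem.Int.floordiv cur v)
                      (exploreB jump f (PySem.Int.floordiv cur v + 1) s0) := by
                    intro x hx hxlt y hr
                    rcases (hE2.2 x).mp hx with hx' | hx'
                    · exact (hE2.2 y).mpr (Or.inl (hcl1' x hx' hxlt y hr))
                    · exact (hE2.2 y).mpr (Or.inr (Relation.ReflTransGen.trans hx' hr))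
                  have hI := ihl (fun w hw => hmemj w (List.mem_cons_of_mem _ hw)) _ hE2.1 hcl2'
                  simp only [List.foldl_cons, if_pos hrr, if_pos hqq]
                  refine ⟨hI.1, fun y => ?_⟩
                  rw [hI.2 y]
                  rw [hE2.2 y, hE1.2 y]
                  simp only [List.mem_cons, exists_eq_or_imp]
                  constructor
                  · rintro (((h | h) | h) | h)
                    · exact Or.inl h
                    · exact Or.inr (Or.inl (Or.inl ⟨hrr, h⟩))
                    · exact Or.inr (Or.inl (Or.inr ⟨hqq, h⟩))
                    · exact Or.inr (Or.inr h)
                  · rintro (h | ((⟨_, h⟩ | ⟨_, h⟩) | h))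
                    · exact Or.inl (Or.inl (Or.inl h))
                    · exact Or.inl (Or.inl (Or.inr h))
                    · exact Or.inl (Or.inr h)
                    · exact Or.inr h
                · have hv2 : 2 ≤ v := by
                    rcases hj v hvj with hneg | hv2
                    · exact absurd hrr (negv_guards cur v (by omega) hneg).1
                    · exact hv2
                  obtain ⟨hs1, hs2⟩ := (succ_bound cur v h2 hv2).1 hrr
                  have hE1 := ih (PySem.Int.floordiv cur v + 1) s0 hs1 (by omega) hnd0
                    (fun x hx hxle y hr => hcl0 x hx (by omega) y hr)
                  have hcl1' : ∀ x ∈ exploreB jump f (PySem.Int.floordiv cur v + 1) s0, x < cur →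
                      ∀ y, ReachR jump x y → y ∈ exploreB jump f (PySem.Int.floordiv cur v + 1) s0 := by
                    intro x hx hxlt y hr
                    rcases (hE1.2 x).mp hx with hx' | hx'
                    · exact (hE1.2 y).mpr (Or.inl (hcl0 x hx' hxlt y hr))
                    · exact (hE1.2 y).mpr (Or.inr (Relation.ReflTransGen.trans hx' hr))
                  have hI := ihl (fun w hw => hmemj w (List.mem_cons_of_mem _ hw)) _ hE1.1 hcl1'
                  simp only [List.foldl_cons, if_pos hrr, if_neg hqq]
                  refine ⟨hI.1, fun y => ?_⟩
                  rw [hI.2 y, hE1.2 y]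
                  simp only [List.mem_cons, exists_eq_or_imp]
                  constructor
                  · rintro ((h | h) | h)
                    · exact Or.inl h
                    · exact Or.inr (Or.inl (Or.inl ⟨hrr, h⟩))
                    · exact Or.inr (Or.inr h)
                  · rintro (h | ((⟨_, h⟩ | ⟨hq0, _⟩) | h))
                    · exact Or.inl (Or.inl h)
                    · exact Or.inl (Or.inr h)
                    · exact absurd hq0 hqq
                    · exact Or.inr h
                · have hv2 : 2 ≤ v := by
                    rcases hj v hvj with hneg | hv2
                    · exact absurd hqq (negv_guards cur v (by omega) hneg).2
                    · exact hv2
                  obtain ⟨ht1, ht2⟩ := (succ_bound cur v h2 hv2).2 hqq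
                  have hE2 := ih (PySem.Int.floordiv cur v) s0 ht1 (by omega) hnd0
                    (fun x hx hxle y hr => hcl0 x hx (by omega) y hr)
                  have hcl2' : ∀ x ∈ exploreB jump f (PySem.Int.floordiv cur v) s0, x < cur →
                      ∀ y, ReachR jump x y → y ∈ exploreB jump f (PySem.Int.floordiv cur v) s0 := by
                    intro x hx hxlt y hr
                    rcases (hE2.2 x).mp hx with hx' | hx'
                    · exact (hE2.2 y).mpr (Or.inl (hcl0 x hx' hxlt y hr))
                    · exact (hE2.2 y).mpr (Or.inr (Relation.ReflTransGen.trans hx' hr))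
                  have hI := ihl (fun w hw => hmemj w (List.mem_cons_of_mem _ hw)) _ hE2.1 hcl2'
                  simp only [List.foldl_cons, if_neg hrr, if_pos hqq]
                  refine ⟨hI.1, fun y => ?_⟩
                  rw [hI.2 y, hE2.2 y]
                  simp only [List.mem_cons, exists_eq_or_imp]
                  constructor
                  · rintro ((h | h) | h)
                    · exact Or.inl h
                    · exact Or.inr (Or.inl (Or.inr ⟨hqq, h⟩))
                    · exact Or.inr (Or.inr h)
                  · rintro (h | ((⟨hr0, _⟩ | ⟨_, h⟩) | h))
                    · exact Or.inl (Or.inl h)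
                    · exact absurd hr0 hrr
                    · exact Or.inl (Or.inr h)
                    · exact Or.inr h
                · have hI := ihl (fun w hw => hmemj w (List.mem_cons_of_mem _ hw)) s0 hnd0 hcl0
                  simp only [List.foldl_cons, if_neg hrr, if_neg hqq]
                  refine ⟨hI.1, fun y => ?_⟩
                  rw [hI.2 y]
                  simp only [List.mem_cons, exists_eq_or_imp]
                  constructor
                  · rintro (h | h)
                    · exact Or.inl h
                    · exact Or.inr (Or.inr h)
                  · rintro (h | ((⟨hr0, _⟩ | ⟨hq0, _⟩) | h))
                    · exact Or.inl h
                    · exact absurd hr0 hrr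
                    · exact absurd hq0 hqq
                    · exact Or.inr h
          obtain ⟨k1, k2⟩ := key jump (fun v hv => hv) (PySem.Set.add sn cur) hnd1 hcl1
          refine ⟨k1, fun y => ?_⟩
          rw [k2 y, hmem1 y, reach_unfold hc, or_assoc]

-- ------- B side: the bottom-up table agrees with the recurrence -------

lemma bestTable_fold (inc dec : Int) (jump cost : List Int) (hj : ∀ v ∈ jump, v ≤ -1 ∨ 2 ≤ v)
    (Sok : Int → Prop)
    (hS1 : ∀ x, Sok x → 1 ≤ x)
    (hSc : ∀ x, Sok x → x ≠ 1 → ∀ v ∈ jump,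
      (0 < PySem.Int.mod x v → Sok (PySem.Int.floordiv x v + 1)) ∧
      (0 < PySem.Int.floordiv x v → Sok (PySem.Int.floordiv x v))) :
    ∀ (rest : List Int) (best : PySem.Dict Int Int), rest.Pairwise (· < ·) → (∀ x ∈ rest, Sok x) →
      (∀ x, Sok x → x ∉ rest → best.getD x 0 = dpV inc dec jump cost x) →
      ∀ x, Sok x →
        (rest.foldl (fun best cur =>
          if cur = 1 then best.insert cur inc
          else best.insert cur
            ((PySem.List.enumerate jump 0).foldl (jbody inc dec cost cur (fun s => best.getD s 0)) (inc * cur)))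
          best).getD x 0 = dpV inc dec jump cost x := by
  intro rest
  induction rest with
  | nil => intro best hpw hmem hdone x hx; exact hdone x hx List.not_mem_nil
  | cons cur rest ihr =>
      intro best hpw hmem hdone x hx
      have hpw' := List.pairwise_cons.mp hpw
      simp only [List.foldl_cons]
      refine ihr _ hpw'.2 (fun z hz => hmem z (List.mem_cons_of_mem _ hz)) ?_ x hx
      intro z hz hznotin
      by_cases hzc : z = cur
      · subst hzc
        by_cases hc1 : z = 1
        · rw [if_pos hc1, PySem.Dict.getD_insert, if_pos rfl, hc1, dpV_one]
        · have hz1 := hS1 z (hmem z List.mem_cons_self)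
          have hcur2 : 2 ≤ z := by omega
          rw [if_neg hc1, PySem.Dict.getD_insert, if_pos rfl,
            dpV_eq inc dec jump cost hj z hcur2]
          apply PySem.List.foldl_congr_mem
          intro acc p hp
          have hpj := mem_enumerate_snd hp
          have hSc' := hSc z (hmem z List.mem_cons_self) hc1 p.2 hpj
          apply jbody_congr
          · intro hrr
            have hv2 : 2 ≤ p.2 := by
              rcases hj p.2 hpj with hneg | hv2
              · exact absurd hrr (negv_guards z p.2 (by omega) hneg).1
              · exact hv2
            obtain ⟨hs1, hs2⟩ := (succ_bound z p.2 hcur2 hv2).1 hrr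
            have hsok := hSc'.1 hrr
            have hnot : PySem.Int.floordiv z p.2 + 1 ∉ z :: rest := by
              intro hmm
              rcases List.mem_cons.mp hmm with he | hm
              · omega
              · have := hpw'.1 _ hm
                omega
            exact hdone _ hsok hnot
          · intro hqq
            have hv2 : 2 ≤ p.2 := by
              rcases hj p.2 hpj with hneg | hv2
              · exact absurd hqq (negv_guards z p.2 (by omega) hneg).2
              · exact hv2
            obtain ⟨hs1, hs2⟩ := (succ_bound z p.2 hcur2 hv2).2 hqq
            have hsok := hSc'.2 hqq
            have hnot : PySem.Int.floordiv z p.2 ∉ z :: rest := by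
              intro hmm
              rcases List.mem_cons.mp hmm with he | hm
              · omega
              · have := hpw'.1 _ hm
                omega
            exact hdone _ hsok hnot
      · have hz' : z ∉ cur :: rest := by
          intro hmm
          rcases List.mem_cons.mp hmm with he | hm
          · exact hzc he
          · exact hznotin hm
        by_cases hc1 : cur = 1
        · rw [if_pos hc1, PySem.Dict.getD_insert, if_neg hzc]
          exact hdone z hz hz'
        · rw [if_neg hc1, PySem.Dict.getD_insert, if_neg hzc]
          exact hdone z hz hz'

-- ------- degenerate targets ≤ 0 on which no branch guard fires: all three loops are no-ops -------

lemma jbody_nofire (inc dec : Int) (jump cost : List Int) (cur : Int) (rec : Int → Int)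
    (hng : ∀ v ∈ jump, ¬ 0 < PySem.Int.mod cur v ∧ ¬ 0 < PySem.Int.floordiv cur v) :
    ∀ (l : List (Int × Int)), (∀ p ∈ l, p.2 ∈ jump) → ∀ (res : Int),
      List.foldl (jbody inc dec cost cur rec) res l = res := by
  intro l
  induction l with
  | nil => intro _ res; rfl
  | cons p l ihl =>
      intro hmem res
      have hg := hng p.2 (hmem p List.mem_cons_self)
      simp only [List.foldl_cons, jbody, if_neg hg.1, if_neg hg.2]
      exact ihl (fun w hw => hmem w (List.mem_cons_of_mem _ hw)) res

-- ===== VERDICT (by name: the statement is the Claim_ definition above) =====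
theorem busRapidTransit_spec : Claim_equal_busRapidTransit := by
  intro target inc dec jump cost _hdom hpre
  rcases hpre with ⟨ht, hrest⟩ | ⟨ht0, _hz, hng⟩
  case inr =>
    -- target ≤ 0, no branch guard can fire: both sides return inc * target mod 10^9+7
    unfold Spec_busRapidTransit busRapidTransit busRapidTransit_alt
    have hT : target.toNat + 1 = 1 := by omega
    have hne1 : ¬ target = 1 := by omega
    have eA : (dpA inc dec jump cost (target.toNat + 1) target PySem.Dict.empty).1 = inc * target := by
      rw [hT]
      simp only [dpA, PySem.Dict.get?_empty]
      rw [if_neg hne1]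
      rw [PySem.List.foldl_congr_mem (PySem.List.enumerate jump 0) _
        (fun (st : Int × PySem.Dict Int Int) (_ : Int × Int) => st) (inc * target, PySem.Dict.empty)
        (by
          intro acc p hp
          have hg := hng p.2 (mem_enumerate_snd hp)
          simp only [if_neg hg.1, if_neg hg.2])]
      rw [List.foldl_fixed]
    have eE : exploreB jump (target.toNat + 1) target PySem.Set.empty = [target] := by
      rw [hT]
      simp only [exploreB, ite_self]
      rw [if_neg (show ¬ PySem.Set.contains PySem.Set.empty target = true by simp [PySem.Set.contains, PySem.Set.empty])]
      rw [if_neg hne1, List.foldl_fixed]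
      rfl
    have hsort : PySem.List.sorted ([target] : List Int) (fun x => x) false = [target] := rfl
    have eB : bestTable inc dec jump cost [target] = PySem.Dict.empty.insert target (inc * target) := by
      simp only [bestTable, List.foldl_cons, List.foldl_nil]
      rw [if_neg hne1]
      rw [jbody_nofire inc dec jump cost target _ hng (PySem.List.enumerate jump 0)
        (fun p hp => mem_enumerate_snd hp) (inc * target)]
    rw [eA]
    simp only [eE, hsort, eB, PySem.Dict.getD_insert_self]
  rcases hrest with h1 | ⟨hj, _hcost⟩
  · -- target = 1: both sides compute inc directly, jump is never consulted
    subst h1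
    unfold Spec_busRapidTransit busRapidTransit busRapidTransit_alt
    have eA : (dpA inc dec jump cost ((1:Int).toNat + 1) 1 PySem.Dict.empty).1 = inc := rfl
    have hex : exploreB jump ((1:Int).toNat + 1) 1 PySem.Set.empty = [1] := rfl
    have hsort : PySem.List.sorted ([1] : List Int) (fun x => x) false = [1] := rfl
    have hbt : bestTable inc dec jump cost [1] = PySem.Dict.empty.insert 1 inc := rfl
    rw [eA]
    simp only [hex, hsort, hbt, PySem.Dict.getD_insert_self]
  unfold Spec_busRapidTransit busRapidTransit busRapidTransit_alt
  have hgood0 : GoodC inc dec jump cost PySem.Dict.empty := by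
    intro k v hk
    rw [PySem.Dict.get?_empty] at hk
    cases hk
  have hA := dpA_correct inc dec jump cost hj (target.toNat + 1) target PySem.Dict.empty ht (by omega) hgood0
  rw [hA.1]
  have hE := explore_correct jump hj (target.toNat + 1) target PySem.Set.empty ht (by omega)
    List.nodup_nil (by intro x hx; simp [PySem.Set.empty] at hx)
  set S := exploreB jump (target.toNat + 1) target PySem.Set.empty with hS
  have hmemS : ∀ y, y ∈ S ↔ ReachR jump target y := by
    intro y
    rw [hE.2 y]
    simp [PySem.Set.empty]
  set ss := PySem.List.sorted S (fun x => x) false with hss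
  have hperm : ss.Perm S := PySem.List.sorted_perm S (fun x => x) false
  have hmemss : ∀ y, y ∈ ss ↔ ReachR jump target y := fun y => (hperm.mem_iff).trans (hmemS y)
  have hndss : ss.Nodup := (hperm.nodup_iff).mpr hE.1
  have hple : ss.Pairwise (fun a b => a ≤ b) := PySem.List.sorted_pairwise S (fun x => x)
  have hplt : ss.Pairwise (· < ·) :=
    (hple.and hndss).imp (fun h => lt_of_le_of_ne h.1 h.2)
  have hS1 : ∀ x, ReachR jump target x → 1 ≤ x := fun x hx => (reach_le hj ht hx).1
  have hSc : ∀ x, ReachR jump target x → x ≠ 1 → ∀ v ∈ jump,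
      (0 < PySem.Int.mod x v → ReachR jump target (PySem.Int.floordiv x v + 1)) ∧
      (0 < PySem.Int.floordiv x v → ReachR jump target (PySem.Int.floordiv x v)) := by
    intro x hx hne v hv
    constructor
    · intro hrr
      exact Relation.ReflTransGen.tail hx ⟨hne, v, hv, Or.inl ⟨hrr, rfl⟩⟩
    · intro hqq
      exact Relation.ReflTransGen.tail hx ⟨hne, v, hv, Or.inr ⟨hqq, rfl⟩⟩
  have hT := bestTable_fold inc dec jump cost hj (fun x => ReachR jump target x) hS1 hSc ss
    PySem.Dict.empty hplt (fun x hx => (hmemss x).mp hx)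
    (fun x hx hnx => absurd ((hmemss x).mpr hx) hnx)
    target Relation.ReflTransGen.refl
  simp only [bestTable]
  rw [hT]
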